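-- pv_equiv track=rewrite | github.com/DmytriP/study_projects | Python/serwery/servers.py | check_product_name
-- ===== SOURCE A (Python) =====
-- def check_product_name(key: str, n: int) -> bool:
--     numbers_in_name = ""
--     letters_in_name = ""
--     for i in range(len(key)):
--         if key[:i].isalpha():
--             letters_in_name = key[:i]
--             numbers_in_name = key[i:]
--     return (len(letters_in_name) is n) and 1 < len(numbers_in_name) < 4
-- ===== SOURCE B (Python) =====
-- def check_product_name(key: str, n: int) -> bool:
--     # A valid product name is n letters followed by 2-3 more characters.
--     run = 0
--     while run < len(key) and key[run].isalpha():
--         run += 1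
--     return run == n and 2 <= len(key) - run <= 3
-- ===== Notes on version B (the rewrite author's own statement) =====
-- stated objective: faster
-- what changed: B finds the leading alphabetic run with one linear scan instead of A's re-slicing and re-validating every prefix of the key, and checks the two lengths directly instead of via leftover loop state and an 'is' identity test.
-- intended difference: On keys whose leading alphabetic run has length exactly n and a 2-3 character remainder, but where that run is empty (n=0) or longer than 256, A returns False (its loop never assigns the parts for an empty run, and 'len(...) is n' fails outside CPython's small-int cache) while B returns True, the intended split-and-length check. — e.g. on check_product_name("12", 0): A returns false, B returns true
import Mathlib
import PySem

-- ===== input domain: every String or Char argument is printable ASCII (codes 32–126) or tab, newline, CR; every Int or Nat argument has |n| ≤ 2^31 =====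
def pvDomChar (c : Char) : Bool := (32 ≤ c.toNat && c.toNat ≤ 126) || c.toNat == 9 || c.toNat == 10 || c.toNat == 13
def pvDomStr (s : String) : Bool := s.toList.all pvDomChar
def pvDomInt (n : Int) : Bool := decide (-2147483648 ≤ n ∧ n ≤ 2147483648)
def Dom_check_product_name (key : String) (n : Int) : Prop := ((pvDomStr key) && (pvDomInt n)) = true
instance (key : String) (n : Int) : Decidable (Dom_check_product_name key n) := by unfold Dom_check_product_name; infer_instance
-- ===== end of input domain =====

-- B replaces A's quadratic scan over all prefixes by one linear scan for the leading
-- alphabetic run and checks the two part lengths directly (intended difference on an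
-- exceptional corner, stated in D_ below).

-- ===== PORT A =====
-- Literal port of A's loop over range(len(key)); strings are handled on the .toList side
-- (PySem.Str.* are thin wrappers over PySem.Chars.* on toList).  State is
-- (numbers_in_name, letters_in_name).  Python's 'len(letters) is n' is int identity:
-- in CPython it is True exactly when the values are equal and the (nonnegative) length
-- is in the small-int cache, i.e. ≤ 256 — ported as equality && length ≤ 256.
def check_product_name (key : String) (n : Int) : Bool :=
  let l := key.toList
  let st := (PySem.List.pyRange 0 (l.length : Int) 1).foldl
    (fun (acc : List Char × List Char) i =>
      if PySem.Chars.strIsalpha (PySem.List.slice l none (some i)) then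
        (PySem.List.slice l (some i) none, PySem.List.slice l none (some i))
      else acc)
    ([], [])
  (decide ((st.2.length : Int) = n) && decide (st.2.length ≤ 256)) &&
    decide ((1 : Int) < (st.1.length : Int) ∧ (st.1.length : Int) < 4)

-- ===== PORT B =====
-- Source B's while-loop counting the leading alphabetic run is List.takeWhile.
def check_product_name_alt (key : String) (n : Int) : Bool :=
  let l := key.toList
  let run := (l.takeWhile PySem.Chars.isalpha).length
  decide ((run : Int) = n) && decide (2 ≤ l.length - run) && decide (l.length - run ≤ 3)

-- ===== PRECONDITION & SPEC =====
-- On keys whose leading alphabetic run has length exactly n and a 2–3 character remainder,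
-- but where that run is empty (n = 0) or longer than 256, A returns False (its loop never
-- assigns the parts for an empty run, and 'len(...) is n' fails outside CPython's small-int
-- cache) while B returns True, the intended split-and-length check.
def D_check_product_name (key : String) (n : Int) : Prop :=
  (((key.toList.takeWhile PySem.Chars.isalpha).length : Int) = n) ∧
  2 ≤ key.toList.length - (key.toList.takeWhile PySem.Chars.isalpha).length ∧
  key.toList.length - (key.toList.takeWhile PySem.Chars.isalpha).length ≤ 3 ∧
  ((key.toList.takeWhile PySem.Chars.isalpha).length = 0 ∨
    256 < (key.toList.takeWhile PySem.Chars.isalpha).length)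
instance (key : String) (n : Int) : Decidable (D_check_product_name key n) := by
  unfold D_check_product_name; infer_instance
def Spec_check_product_name (key : String) (n : Int) (out : Bool) : Prop :=
  ¬ D_check_product_name key n → out = check_product_name_alt key n
instance (key : String) (n : Int) (out : Bool) : Decidable (Spec_check_product_name key n out) := by
  unfold Spec_check_product_name; infer_instance
def pvDiffWitness_check_product_name : String × Int := ("12", 0)
def pvDiffWitnessOut_check_product_name : Bool × Bool := (false, true)

-- ===== CLAIM (what is proved, stated in full; the proofs are below) =====
def Claim_unchanged_check_product_name : Prop := ∀ (key : String) (n : Int), Dom_check_product_name key n → Spec_check_product_name key n (check_product_name key n)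
def Claim_changed_check_product_name : Prop := Dom_check_product_name (pvDiffWitness_check_product_name.1) (pvDiffWitness_check_product_name.2) ∧ D_check_product_name (pvDiffWitness_check_product_name.1) (pvDiffWitness_check_product_name.2) ∧ check_product_name (pvDiffWitness_check_product_name.1) (pvDiffWitness_check_product_name.2) = pvDiffWitnessOut_check_product_name.1 ∧ check_product_name_alt (pvDiffWitness_check_product_name.1) (pvDiffWitness_check_product_name.2) = pvDiffWitnessOut_check_product_name.2 ∧ pvDiffWitnessOut_check_product_name.1 ≠ pvDiffWitnessOut_check_product_name.2
def Claim_exact_check_product_name : Prop := ∀ (key : String) (n : Int), Dom_check_product_name key n → D_check_product_name key n → check_product_name key n ≠ check_product_name_alt key n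

-- ===== LEMMAS AND PROOFS =====

theorem take_all_alpha_iff (l : List Char) (i : Nat) (hi : i ≤ l.length) :
    (l.take i).all PySem.Chars.isalpha = true ↔ i ≤ (l.takeWhile PySem.Chars.isalpha).length := by
  induction l generalizing i with
  | nil => simp at hi; simp [hi]
  | cons a t ih =>
    cases i with
    | zero => simp
    | succ i =>
      simp only [List.take_succ_cons, List.all_cons, List.takeWhile]
      by_cases ha : PySem.Chars.isalpha a
      · simp [ha, ih i (by simpa using hi)]
      · simp [ha]

theorem strIsalpha_take (l : List Char) (i : Nat) (hi : i ≤ l.length) :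
    PySem.Chars.strIsalpha (l.take i)
      = decide (0 < i ∧ i ≤ (l.takeWhile PySem.Chars.isalpha).length) := by
  have h := take_all_alpha_iff l i hi
  cases i with
  | zero => simp [PySem.Chars.strIsalpha]
  | succ i =>
    have hne : l.take (i + 1) ≠ [] := by
      simp only [ne_eq, List.take_eq_nil_iff]
      rintro (h1 | rfl)
      · omega
      · simp at hi
    simp only [PySem.Chars.strIsalpha]
    rcases hb : (l.take (i + 1)).all PySem.Chars.isalpha with _ | _
    · simp
      by_contra hlt
      exact absurd (h.mpr (by omega)) (by simp [hb])
    · simp [hne, h.mp hb]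

theorem loopA (l : List Char) (m : Nat) (hm : m ≤ l.length) :
    ((List.range m).foldl
      (fun (acc : List Char × List Char) (k : Nat) =>
        if PySem.Chars.strIsalpha (l.take k) then (l.drop k, l.take k) else acc) ([], []))
    = if 2 ≤ m ∧ 1 ≤ (l.takeWhile PySem.Chars.isalpha).length
      then (l.drop (min (l.takeWhile PySem.Chars.isalpha).length (m - 1)),
            l.take (min (l.takeWhile PySem.Chars.isalpha).length (m - 1)))
      else ([], []) := by
  induction m with
  | zero => simp
  | succ m ih =>
    rw [List.range_succ, List.foldl_append, ih (by omega)]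
    simp only [List.foldl_cons, List.foldl_nil]
    rw [strIsalpha_take l m (by omega)]
    have hr : (l.takeWhile PySem.Chars.isalpha).length ≤ l.length := (List.takeWhile_prefix _).sublist.length_le
    by_cases hc : 0 < m ∧ m ≤ (l.takeWhile PySem.Chars.isalpha).length
    · rw [if_pos (by simpa using hc)]
      rw [if_pos ⟨by omega, by omega⟩]
      have : min (l.takeWhile PySem.Chars.isalpha).length (m + 1 - 1) = m := by omega
      rw [this]
    · rw [if_neg (by simpa using hc)]
      by_cases h1 : 2 ≤ m ∧ 1 ≤ (l.takeWhile PySem.Chars.isalpha).length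
      · rw [if_pos h1, if_pos ⟨by omega, h1.2⟩]
        have : min (l.takeWhile PySem.Chars.isalpha).length (m - 1)
            = min (l.takeWhile PySem.Chars.isalpha).length (m + 1 - 1) := by omega
        rw [this]
      · rw [if_neg h1, if_neg (by intro h2; exact h1 ⟨by omega, h2.2⟩)]

theorem A_closed (key : String) (n : Int) :
    check_product_name key n
    = (let l := key.toList
       let r := (l.takeWhile PySem.Chars.isalpha).length
       if 2 ≤ l.length ∧ 1 ≤ r then
         let L := min r (l.length - 1)
         (decide ((L : Int) = n) && decide (L ≤ 256)) &&
           decide ((1 : Int) < ((l.length - L : Nat) : Int) ∧ ((l.length - L : Nat) : Int) < 4)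
       else false) := by
  show _ = if 2 ≤ key.toList.length ∧ 1 ≤ (key.toList.takeWhile PySem.Chars.isalpha).length then _ else false
  unfold check_product_name
  simp only [PySem.List.pyRange_zero_nat, List.foldl_map, PySem.List.slice_to_natCast,
    PySem.List.slice_from_natCast]
  rw [loopA key.toList key.toList.length le_rfl]
  have hr : (key.toList.takeWhile PySem.Chars.isalpha).length ≤ key.toList.length :=
    (List.takeWhile_prefix _).sublist.length_le
  split_ifs with h
  · have hL : min (key.toList.takeWhile PySem.Chars.isalpha).length (key.toList.length - 1)
        ≤ key.toList.length := by omega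
    simp [List.length_take, List.length_drop]
  · simp

theorem check_product_name_spec : Claim_unchanged_check_product_name := by
  intro key n _ hD
  show check_product_name key n = check_product_name_alt key n
  rw [A_closed]
  unfold check_product_name_alt D_check_product_name at *
  simp only []
  have hr : (key.toList.takeWhile PySem.Chars.isalpha).length ≤ key.toList.length :=
    (List.takeWhile_prefix _).sublist.length_le
  set r := (key.toList.takeWhile PySem.Chars.isalpha).length with hrdef
  set len := key.toList.length with hlen
  by_cases h1 : 2 ≤ len ∧ 1 ≤ r
  · rw [if_pos h1]
    simp only [← Bool.decide_and]
    rw [decide_eq_decide]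
    omega
  · rw [if_neg h1]
    simp only [← Bool.decide_and]
    rw [eq_comm, decide_eq_false_iff_not]
    omega

theorem check_product_name_changed : Claim_changed_check_product_name := by
  unfold Claim_changed_check_product_name
  refine ⟨by decide, by decide, by decide, by decide, by decide⟩

theorem check_product_name_tight : Claim_exact_check_product_name := by
  intro key n _ hD
  rw [A_closed]
  unfold check_product_name_alt D_check_product_name at *
  simp only []
  have hr : (key.toList.takeWhile PySem.Chars.isalpha).length ≤ key.toList.length :=
    (List.takeWhile_prefix _).sublist.length_le
  set r := (key.toList.takeWhile PySem.Chars.isalpha).length with hrdef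
  set len := key.toList.length with hlen
  obtain ⟨h1, h2, h3, h4⟩ := hD
  have hB : (decide ((r : Int) = n) && decide (2 ≤ len - r) && decide (len - r ≤ 3)) = true := by
    simp only [Bool.and_eq_true, decide_eq_true_eq]
    exact ⟨⟨h1, h2⟩, h3⟩
  rw [hB]
  rcases h4 with h0 | h256
  · rw [if_neg (by omega)]; simp
  · rw [if_pos (by constructor <;> omega)]
    have hmin : min r (len - 1) = r := by omega
    rw [hmin]
    simp [show ¬ (r ≤ 256) by omega]
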